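-- pv_equiv track=rewrite | github.com/Efrain-F/Algoritmo-encontrar-Islas | main.py | separarIslas
-- ===== SOURCE A (Python) =====
-- def separarIslas(matriz):
--     # los limites
--     numColum = len(matriz[1])
--     numRow = len(matriz)
--     def filtro(ro,co):
--         if(ro>=numRow or ro<0 or co >= numColum or co<0): return False
--         else:
--             if(matriz[ro][co]==1):verAlrededor(ro,co)
--     def verAlrededor(row,colm):
--         # desactivamos los uno de la matriz
--         matriz[row][colm] = 0
--         # registrar sus alrededores
--         filtro(row-1,colm) # arriba
--         filtro(row+1,colm) # abajo
--         filtro(row,colm+1) # izquierda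
--         filtro(row,colm-1) # derecha
--
--     for row in range(0,numRow):
--         for colm in range(0,numColum):
--             # encontrar todas las posiciones que estan en el borde
--             if(row== 0 or colm == 0 or row== numRow-1 or colm == numRow-1 or row== numColum-1or colm == numColum-1):
--                 # las posiciones que tiene uno como valor
--                 if(matriz[row][colm] == 1):
--                     verAlrededor(row,colm)
--     return matriz
-- ===== SOURCE B (Python) =====
-- # Iterative re-implementation: same border-seed scan, but the recursive
-- # verAlrededor/filtro pair is replaced by an explicit-stack flood fill.
-- # Like A, it mutates `matriz` in place and returns it.
-- def separarIslas(matriz):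
--     numColum = len(matriz[1])
--     numRow = len(matriz)
--     for row in range(numRow):
--         for colm in range(numColum):
--             if (row == 0 or colm == 0 or row == numRow - 1 or colm == numRow - 1
--                     or row == numColum - 1 or colm == numColum - 1):
--                 stack = [(row, colm)]
--                 while stack:
--                     r, c = stack.pop()
--                     if 0 <= r < numRow and 0 <= c < numColum and matriz[r][c] == 1:
--                         matriz[r][c] = 0
--                         stack.extend([(r, c - 1), (r, c + 1), (r + 1, c), (r - 1, c)])
--     return matriz
-- ===== Notes on version B (the rewrite author's own statement) =====
-- stated objective: alternative
-- what changed: Replaces A's mutually recursive verAlrededor/filtro flood fill with an iterative explicit-stack flood fill started at each border seed, keeping the same border scan and neighbour order.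
import Mathlib
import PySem

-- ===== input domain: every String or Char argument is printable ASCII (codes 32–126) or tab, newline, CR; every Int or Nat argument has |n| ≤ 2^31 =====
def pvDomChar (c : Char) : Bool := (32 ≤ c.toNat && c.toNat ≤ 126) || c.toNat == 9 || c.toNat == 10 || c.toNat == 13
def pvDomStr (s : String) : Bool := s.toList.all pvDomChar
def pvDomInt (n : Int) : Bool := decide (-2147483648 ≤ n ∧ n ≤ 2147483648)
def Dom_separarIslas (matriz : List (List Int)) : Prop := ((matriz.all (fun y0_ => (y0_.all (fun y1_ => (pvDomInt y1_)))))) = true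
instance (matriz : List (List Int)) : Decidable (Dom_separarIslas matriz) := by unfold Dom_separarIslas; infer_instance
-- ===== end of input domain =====

-- B replaces A's recursive verAlrededor/filtro flood fill by an explicit-stack
-- iterative flood fill (objective: alternative); both mutate the matrix in Python —
-- the equivalence proved here is about the returned value.

-- shared low-level cell access (matriz[r][c] read, and matriz[r][c] = 0 write;
-- every call site first checks 0 ≤ r < numRow and 0 ≤ c < numColum, as in Python)
def mget (m : List (List Int)) (r c : Int) : Int :=
  (PySem.List.pyGet? ((PySem.List.pyGet? m r).getD []) c).getD 0

def mset0 (m : List (List Int)) (r c : Int) : List (List Int) :=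
  m.set r.toNat ((m.getD r.toNat []).set c.toNat 0)

-- number of 1-entries: the termination measure of the flood fill
def onesM (m : List (List Int)) : Nat := (m.map (fun row => row.count 1)).sum

-- a read of 1 at nonnegative, checked indices zeroes exactly one 1;
-- cited by loopB's decreasing_by, so it must precede the port (self-contained proof)
theorem onesM_mset0_lt (m : List (List Int)) (r c : Int)
    (hr : 0 ≤ r) (hc : 0 ≤ c) (h : mget m r c = 1) :
    onesM (mset0 m r c) < onesM m := by
  have hrowcount : ∀ (row : List Int) (k : Nat), row[k]? = some 1 →
      (row.set k 0).count 1 + 1 = row.count 1 := by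
    intro row
    induction row with
    | nil => intro k hk; simp at hk
    | cons x xs ih =>
      intro k hk
      cases k with
      | zero => simp at hk; simp [hk]
      | succ k =>
        simp at hk
        have := ih k hk
        simp [List.count_cons]
        omega
  have hset : ∀ (mm : List (List Int)) (n k : Nat) (row : List Int),
      mm[n]? = some row → row[k]? = some 1 →
      onesM (mm.set n ((mm.getD n []).set k 0)) + 1 = onesM mm := by
    intro mm
    induction mm with
    | nil => intro n k row hn; simp at hn
    | cons r0 rest ih =>
      intro n k row hn hk
      cases n with
      | zero =>
        simp at hn; subst hn
        have := hrowcount r0 k hk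
        simp [onesM, List.getD]; omega
      | succ n =>
        simp at hn
        have := ih n k row hn hk
        simp [onesM, List.getD] at this ⊢
        omega
  unfold mget at h
  rcases h1 : PySem.List.pyGet? m r with _ | row
  · rw [h1] at h; simp [PySem.List.pyGet?] at h
  · rw [h1] at h
    simp only [Option.getD_some] at h
    rcases h2 : PySem.List.pyGet? row c with _ | v
    · rw [h2] at h; simp at h
    · rw [h2] at h; simp at h; subst h
      rw [PySem.List.pyGet?_of_nonneg m hr] at h1
      rw [PySem.List.pyGet?_of_nonneg row hc] at h2
      have hgetD : m.getD r.toNat [] = row := by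
        simp [List.getD_eq_getElem?_getD, h1]
      have := hset m r.toNat c.toNat row h1 h2
      rw [hgetD] at this
      unfold mset0
      rw [hgetD]
      omega

-- ===== PORT A =====
-- A's mutual recursion filtro/verAlrededor, state-passing; the Nat fuel is only a
-- totality guard (2·onesM+1 at the top call always suffices: each verAlrededor
-- zeroes a 1, so the call depth is bounded; the proofs below never rely on the
-- guard firing).
mutual
def filtroF (numRow numColum : Int) : Nat → List (List Int) → Int → Int → List (List Int)
  | 0, m, _, _ => m
  | fuel + 1, m, ro, co =>
    if ro ≥ numRow ∨ ro < 0 ∨ co ≥ numColum ∨ co < 0 then m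
    else if mget m ro co = 1 then verAF numRow numColum fuel m ro co else m
def verAF (numRow numColum : Int) : Nat → List (List Int) → Int → Int → List (List Int)
  | 0, m, _, _ => m
  | fuel + 1, m, row, colm =>
    let m0 := mset0 m row colm
    let m1 := filtroF numRow numColum fuel m0 (row - 1) colm
    let m2 := filtroF numRow numColum fuel m1 (row + 1) colm
    let m3 := filtroF numRow numColum fuel m2 row (colm + 1)
    filtroF numRow numColum fuel m3 row (colm - 1)
end

def separarIslas (matriz : List (List Int)) : List (List Int) :=
  let numColum : Int := ((PySem.List.pyGet? matriz 1).getD []).length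
  let numRow : Int := matriz.length
  (PySem.List.pyRange 0 numRow 1).foldl (fun m row =>
    (PySem.List.pyRange 0 numColum 1).foldl (fun m colm =>
      if row = 0 ∨ colm = 0 ∨ row = numRow - 1 ∨ colm = numRow - 1 ∨
         row = numColum - 1 ∨ colm = numColum - 1 then
        if mget m row colm = 1 then
          verAF numRow numColum (2 * onesM matriz + 1) m row colm
        else m
      else m) m) matriz

-- ===== PORT B =====
-- B's explicit-stack flood fill: stack top = list head (Python pops from the end,
-- so extend([a,b,c,d]) followed by pops yields d,c,b,a = the cons order here).
def loopB (numRow numColum : Int) : List (List Int) → List (Int × Int) → List (List Int)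
  | m, [] => m
  | m, (r, c) :: rest =>
    if h : 0 ≤ r ∧ r < numRow ∧ 0 ≤ c ∧ c < numColum ∧ mget m r c = 1 then
      loopB numRow numColum (mset0 m r c)
        ((r - 1, c) :: (r + 1, c) :: (r, c + 1) :: (r, c - 1) :: rest)
    else loopB numRow numColum m rest
termination_by m s => (onesM m, s.length)
decreasing_by
  · exact Prod.Lex.left _ _ (onesM_mset0_lt m r c h.1 h.2.2.1 h.2.2.2.2)
  · exact Prod.Lex.right _ (by simp)

def separarIslas_alt (matriz : List (List Int)) : List (List Int) :=
  let numColum : Int := ((PySem.List.pyGet? matriz 1).getD []).length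
  let numRow : Int := matriz.length
  (PySem.List.pyRange 0 numRow 1).foldl (fun m row =>
    (PySem.List.pyRange 0 numColum 1).foldl (fun m colm =>
      if row = 0 ∨ colm = 0 ∨ row = numRow - 1 ∨ colm = numRow - 1 ∨
         row = numColum - 1 ∨ colm = numColum - 1 then
        loopB numRow numColum m [(row, colm)]
      else m) m) matriz

-- ===== PRECONDITION & SPEC =====
-- Pre_ excludes exactly the inputs on which Python A raises IndexError:
-- fewer than two rows (len(matriz[1])), or some row shorter than row 1
-- (the scan always reads column len(matriz[1])-1 of every row).
def Pre_separarIslas (matriz : List (List Int)) : Prop :=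
  2 ≤ matriz.length ∧
    ∀ row ∈ matriz, ((PySem.List.pyGet? matriz 1).getD []).length ≤ row.length
instance (matriz : List (List Int)) : Decidable (Pre_separarIslas matriz) := by
  unfold Pre_separarIslas; infer_instance

def pvWitness_separarIslas : List (List Int) := [[1, 0], [0, 1]]

def Spec_separarIslas (matriz : List (List Int)) (out : List (List Int)) : Prop := out = separarIslas_alt matriz
instance (matriz : List (List Int)) (out : List (List Int)) : Decidable (Spec_separarIslas matriz out) := by unfold Spec_separarIslas; infer_instance

-- ===== CLAIM (what is proved, stated in full; the proofs are below) =====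
def Claim_equal_separarIslas : Prop := ∀ (matriz : List (List Int)), Dom_separarIslas matriz → Pre_separarIslas matriz → Spec_separarIslas matriz (separarIslas matriz)

-- ===== LEMMAS AND PROOFS =====

-- row-level counting lemmas
theorem rowcount_set_le (row : List Int) (k : Nat) :
    (row.set k 0).count 1 ≤ row.count 1 := by
  induction row generalizing k with
  | nil => simp
  | cons x xs ih =>
    cases k with
    | zero => simp [List.count_cons]
    | succ k => simpa [List.count_cons] using ih k

theorem rowcount_set_eq (row : List Int) (k : Nat) (h : row[k]? = some 1) :
    (row.set k 0).count 1 + 1 = row.count 1 := by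
  induction row generalizing k with
  | nil => simp at h
  | cons x xs ih =>
    cases k with
    | zero => simp at h; simp [h]
    | succ k =>
      simp at h
      have := ih k h
      simp [List.count_cons]
      omega

theorem onesM_set_le (m : List (List Int)) (n k : Nat) :
    onesM (m.set n ((m.getD n []).set k 0)) ≤ onesM m := by
  induction m generalizing n with
  | nil => simp [onesM]
  | cons row rest ih =>
    cases n with
    | zero => simpa [onesM, List.getD] using rowcount_set_le row k
    | succ n => simpa [onesM, List.getD] using ih n

theorem onesM_set_eq (m : List (List Int)) (n k : Nat) (row : List Int)
    (hn : m[n]? = some row) (hk : row[k]? = some 1) :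
    onesM (m.set n ((m.getD n []).set k 0)) + 1 = onesM m := by
  induction m generalizing n with
  | nil => simp at hn
  | cons r0 rest ih =>
    cases n with
    | zero =>
      simp at hn; subst hn
      have := rowcount_set_eq r0 k hk
      simp [onesM, List.getD]; omega
    | succ n =>
      simp at hn
      have := ih n hn
      simp [onesM, List.getD] at this ⊢
      omega


theorem one_le_onesM_of_mget (m : List (List Int)) (r c : Int) (h : mget m r c = 1) :
    1 ≤ onesM m := by
  unfold mget at h
  rcases h1 : PySem.List.pyGet? m r with _ | row
  · rw [h1] at h; simp [PySem.List.pyGet?] at h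
  · rw [h1] at h
    simp only [Option.getD_some] at h
    rcases h2 : PySem.List.pyGet? row c with _ | v
    · rw [h2] at h; simp at h
    · rw [h2] at h; simp at h; subst h
      have hm : row ∈ m := PySem.List.mem_of_pyGet?_eq_some m h1
      have hv : (1 : Int) ∈ row := PySem.List.mem_of_pyGet?_eq_some row h2
      have hcnt : 1 ≤ row.count 1 := List.one_le_count_iff.mpr hv
      have : row.count 1 ∈ m.map (fun row => row.count 1) := List.mem_map_of_mem hm
      calc 1 ≤ row.count 1 := hcnt
        _ ≤ onesM m := List.le_sum_of_mem this

theorem onesM_mset0_le (m : List (List Int)) (r c : Int) :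
    onesM (mset0 m r c) ≤ onesM m := onesM_set_le m r.toNat c.toNat

theorem onesM_mset0_succ (m : List (List Int)) (r c : Int)
    (hr : 0 ≤ r) (hc : 0 ≤ c) (h : mget m r c = 1) :
    onesM (mset0 m r c) + 1 = onesM m := by
  unfold mget at h
  rcases h1 : PySem.List.pyGet? m r with _ | row
  · rw [h1] at h; simp [PySem.List.pyGet?] at h
  · rw [h1] at h
    simp only [Option.getD_some] at h
    rcases h2 : PySem.List.pyGet? row c with _ | v
    · rw [h2] at h; simp at h
    · rw [h2] at h; simp at h; subst h
      rw [PySem.List.pyGet?_of_nonneg m hr] at h1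
      rw [PySem.List.pyGet?_of_nonneg row hc] at h2
      have hgetD : m.getD r.toNat [] = row := by
        simp [List.getD_eq_getElem?_getD, h1]
      have := onesM_set_eq m r.toNat c.toNat row h1 h2
      rw [hgetD] at this
      unfold mset0
      rw [hgetD]
      omega

-- monotonicity: the flood fill never creates 1s
theorem onesM_AB_le (nR nC : Int) (f : Nat) :
    (∀ m ro co, onesM (filtroF nR nC f m ro co) ≤ onesM m) ∧
    (∀ m ro co, onesM (verAF nR nC f m ro co) ≤ onesM m) := by
  induction f with
  | zero => constructor <;> intro m ro co <;> simp [filtroF, verAF]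
  | succ f ih =>
    constructor
    · intro m ro co
      rw [filtroF]
      split
      · exact le_refl _
      · split
        · exact ih.2 m ro co
        · exact le_refl _
    · intro m ro co
      rw [verAF]
      calc onesM _ ≤ _ := ih.1 _ _ _
        _ ≤ _ := ih.1 _ _ _
        _ ≤ _ := ih.1 _ _ _
        _ ≤ _ := ih.1 _ _ _
        _ ≤ onesM m := onesM_mset0_le m ro co

theorem onesM_filtroF_le (nR nC : Int) (f : Nat) (m : List (List Int)) (ro co : Int) :
    onesM (filtroF nR nC f m ro co) ≤ onesM m := (onesM_AB_le nR nC f).1 m ro co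

theorem onesM_verAF_le (nR nC : Int) (f : Nat) (m : List (List Int)) (ro co : Int) :
    onesM (verAF nR nC f m ro co) ≤ onesM m := (onesM_AB_le nR nC f).2 m ro co

theorem filtroF_ones_zero (nR nC : Int) (m : List (List Int)) (h : onesM m = 0)
    (f : Nat) (ro co : Int) : filtroF nR nC f m ro co = m := by
  cases f with
  | zero => rfl
  | succ f =>
    rw [filtroF]
    split
    · rfl
    · split
      · exfalso; have := one_le_onesM_of_mget m ro co (by assumption); omega
      · rfl

-- fuel irrelevance: any sufficient fuel yields the same matrix
theorem irrel_main (nR nC : Int) (k : Nat) :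
    (∀ m, onesM m ≤ k → ∀ (f f' : Nat) (ro co : Int),
      2 * onesM m ≤ f → 2 * onesM m ≤ f' →
      filtroF nR nC f m ro co = filtroF nR nC f' m ro co) ∧
    (∀ m, onesM m ≤ k → ∀ (f f' : Nat) (ro co : Int),
      0 ≤ ro → 0 ≤ co → mget m ro co = 1 →
      2 * onesM m ≤ f + 1 → 2 * onesM m ≤ f' + 1 →
      verAF nR nC f m ro co = verAF nR nC f' m ro co) := by
  induction k with
  | zero =>
    constructor
    · intro m hm f f' ro co _ _
      have h0 : onesM m = 0 := by omega
      rw [filtroF_ones_zero nR nC m h0, filtroF_ones_zero nR nC m h0]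
    · intro m hm f f' ro co _ _ hg _ _
      have := one_le_onesM_of_mget m ro co hg
      omega
  | succ k ih =>
    have V : ∀ m, onesM m ≤ k + 1 → ∀ (f f' : Nat) (ro co : Int),
        0 ≤ ro → 0 ≤ co → mget m ro co = 1 →
        2 * onesM m ≤ f + 1 → 2 * onesM m ≤ f' + 1 →
        verAF nR nC f m ro co = verAF nR nC f' m ro co := by
      intro m hm f f' ro co hro hco hg hf hf'
      have h1 := one_le_onesM_of_mget m ro co hg
      obtain ⟨g, rfl⟩ : ∃ g, f = g + 1 := ⟨f - 1, by omega⟩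
      obtain ⟨g', rfl⟩ : ∃ g', f' = g' + 1 := ⟨f' - 1, by omega⟩
      rw [verAF, verAF]
      have hsucc := onesM_mset0_succ m ro co hro hco hg
      set m0 := mset0 m ro co with hm0
      have hk0 : onesM m0 ≤ k := by omega
      have hF := ih.1
      have e1 : filtroF nR nC g m0 (ro - 1) co = filtroF nR nC g' m0 (ro - 1) co :=
        hF m0 hk0 g g' _ _ (by omega) (by omega)
      rw [← e1]
      set m1 := filtroF nR nC g m0 (ro - 1) co with hm1
      have hk1 : onesM m1 ≤ onesM m0 := onesM_filtroF_le _ _ _ _ _ _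
      have e2 : filtroF nR nC g m1 (ro + 1) co = filtroF nR nC g' m1 (ro + 1) co :=
        hF m1 (by omega) g g' _ _ (by omega) (by omega)
      rw [← e2]
      set m2 := filtroF nR nC g m1 (ro + 1) co with hm2
      have hk2 : onesM m2 ≤ onesM m1 := onesM_filtroF_le _ _ _ _ _ _
      have e3 : filtroF nR nC g m2 ro (co + 1) = filtroF nR nC g' m2 ro (co + 1) :=
        hF m2 (by omega) g g' _ _ (by omega) (by omega)
      rw [← e3]
      set m3 := filtroF nR nC g m2 ro (co + 1) with hm3
      have hk3 : onesM m3 ≤ onesM m2 := onesM_filtroF_le _ _ _ _ _ _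
      exact hF m3 (by omega) g g' _ _ (by omega) (by omega)
    refine ⟨?_, V⟩
    intro m hm f f' ro co hf hf'
    by_cases h0 : onesM m = 0
    · rw [filtroF_ones_zero nR nC m h0, filtroF_ones_zero nR nC m h0]
    · obtain ⟨g, rfl⟩ : ∃ g, f = g + 1 := ⟨f - 1, by omega⟩
      obtain ⟨g', rfl⟩ : ∃ g', f' = g' + 1 := ⟨f' - 1, by omega⟩
      rw [filtroF, filtroF]
      split
      · rfl
      · rename_i hb
        push Not at hb
        split
        · rename_i hg
          exact V m hm g g' ro co (by omega) (by omega) hg (by omega) (by omega)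
        · rfl

theorem filtroF_irrel (nR nC : Int) (m : List (List Int)) (f f' : Nat) (ro co : Int)
    (hf : 2 * onesM m ≤ f) (hf' : 2 * onesM m ≤ f') :
    filtroF nR nC f m ro co = filtroF nR nC f' m ro co :=
  (irrel_main nR nC (onesM m)).1 m (le_refl _) f f' ro co hf hf'

-- when the checked condition fails, filtro leaves the matrix unchanged
theorem filtroF_id_of_not_guard (nR nC : Int) (f : Nat) (m : List (List Int)) (r c : Int)
    (h : ¬(0 ≤ r ∧ r < nR ∧ 0 ≤ c ∧ c < nC ∧ mget m r c = 1)) :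
    filtroF nR nC f m r c = m := by
  cases f with
  | zero => rfl
  | succ f =>
    rw [filtroF]
    by_cases hb : r ≥ nR ∨ r < 0 ∨ c ≥ nC ∨ c < 0
    · rw [if_pos hb]
    · rw [if_neg hb]
      rw [if_neg]
      intro hg
      exact h ⟨by omega, by omega, by omega, by omega, hg⟩

-- the stack loop consumes its top entry exactly as a filtro call would
theorem loopB_sim (nR nC : Int) (k : Nat) :
    ∀ m, onesM m ≤ k → ∀ (s : List (Int × Int)) (r c : Int) (f : Nat),
      2 * onesM m < f →
      loopB nR nC m ((r, c) :: s) = loopB nR nC (filtroF nR nC f m r c) s := by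
  induction k with
  | zero =>
    intro m hm s r c f hf
    have hno : ¬(0 ≤ r ∧ r < nR ∧ 0 ≤ c ∧ c < nC ∧ mget m r c = 1) := by
      rintro ⟨_, _, _, _, hg⟩
      have := one_le_onesM_of_mget m r c hg
      omega
    rw [loopB, dif_neg hno, filtroF_id_of_not_guard nR nC f m r c hno]
  | succ k ih =>
    intro m hm s r c f hf
    by_cases hguard : 0 ≤ r ∧ r < nR ∧ 0 ≤ c ∧ c < nC ∧ mget m r c = 1
    · obtain ⟨hr0, hrR, hc0, hcC, hg1⟩ := hguard
      have h1 := one_le_onesM_of_mget m r c hg1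
      obtain ⟨g, rfl⟩ : ∃ g, f = g + 1 := ⟨f - 1, by omega⟩
      rw [loopB, dif_pos ⟨hr0, hrR, hc0, hcC, hg1⟩]
      have hsucc := onesM_mset0_succ m r c hr0 hc0 hg1
      set m0 := mset0 m r c with hm0def
      have hm0 : onesM m0 ≤ k := by omega
      rw [ih m0 hm0 ((r + 1, c) :: (r, c + 1) :: (r, c - 1) :: s) (r - 1) c g (by omega)]
      set m1 := filtroF nR nC g m0 (r - 1) c with hm1def
      have hle1 : onesM m1 ≤ onesM m0 := onesM_filtroF_le _ _ _ _ _ _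
      rw [ih m1 (by omega) ((r, c + 1) :: (r, c - 1) :: s) (r + 1) c g (by omega)]
      set m2 := filtroF nR nC g m1 (r + 1) c with hm2def
      have hle2 : onesM m2 ≤ onesM m1 := onesM_filtroF_le _ _ _ _ _ _
      rw [ih m2 (by omega) ((r, c - 1) :: s) r (c + 1) g (by omega)]
      set m3 := filtroF nR nC g m2 r (c + 1) with hm3def
      have hle3 : onesM m3 ≤ onesM m2 := onesM_filtroF_le _ _ _ _ _ _
      rw [ih m3 (by omega) s r (c - 1) g (by omega)]
      -- right-hand side: unfold filtro, then verAlrededor, and realign the fuels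
      rw [filtroF, if_neg (show ¬(r ≥ nR ∨ r < 0 ∨ c ≥ nC ∨ c < 0) by omega), if_pos hg1]
      obtain ⟨h, rfl⟩ : ∃ h, g = h + 1 := ⟨g - 1, by omega⟩
      rw [verAF]
      simp only [← hm0def]
      have e1 : filtroF nR nC h m0 (r - 1) c = m1 := by
        rw [hm1def]; exact filtroF_irrel nR nC m0 h (h + 1) _ _ (by omega) (by omega)
      rw [e1]
      have e2 : filtroF nR nC h m1 (r + 1) c = m2 := by
        rw [hm2def]; exact filtroF_irrel nR nC m1 h (h + 1) _ _ (by omega) (by omega)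
      rw [e2]
      have e3 : filtroF nR nC h m2 r (c + 1) = m3 := by
        rw [hm3def]; exact filtroF_irrel nR nC m2 h (h + 1) _ _ (by omega) (by omega)
      rw [e3]
      have e4 : filtroF nR nC h m3 r (c - 1) = filtroF nR nC (h + 1) m3 r (c - 1) :=
        filtroF_irrel nR nC m3 h (h + 1) _ _ (by omega) (by omega)
      rw [e4]
    · rw [loopB, dif_neg hguard, filtroF_id_of_not_guard nR nC f m r c hguard]

-- fold bridging
theorem foldl_eq_inv {α β : Type} (P : β → Prop) (f g : β → α → β)
    (l : List α) : ∀ (b : β), (∀ b x, x ∈ l → P b → f b x = g b x) →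
      (∀ b x, P b → P (f b x)) → P b → l.foldl f b = l.foldl g b := by
  induction l with
  | nil => intro b _ _ _; rfl
  | cons x xs ih =>
    intro b heq hpres hb
    simp only [List.foldl_cons]
    have h1 : f b x = g b x := heq b x (by simp) hb
    rw [← h1]
    exact ih (f b x) (fun b y hy hb => heq b y (by simp [hy]) hb) hpres (hpres b x hb)

theorem foldl_pres {α β : Type} (P : β → Prop) (f : β → α → β)
    (l : List α) : ∀ (b : β), (∀ b x, P b → P (f b x)) → P b → P (l.foldl f b) := by
  induction l with
  | nil => intro b _ hb; exact hb
  | cons x xs ih =>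
    intro b hpres hb
    exact ih (f b x) hpres (hpres b x hb)

-- the outer double scan, for arbitrary limits nR nC
theorem main_aux (init : List (List Int)) (nR nC : Int) :
    (PySem.List.pyRange 0 nR 1).foldl (fun m row =>
      (PySem.List.pyRange 0 nC 1).foldl (fun m colm =>
        if row = 0 ∨ colm = 0 ∨ row = nR - 1 ∨ colm = nR - 1 ∨
           row = nC - 1 ∨ colm = nC - 1 then
          if mget m row colm = 1 then
            verAF nR nC (2 * onesM init + 1) m row colm
          else m
        else m) m) init
    = (PySem.List.pyRange 0 nR 1).foldl (fun m row =>
      (PySem.List.pyRange 0 nC 1).foldl (fun m colm =>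
        if row = 0 ∨ colm = 0 ∨ row = nR - 1 ∨ colm = nR - 1 ∨
           row = nC - 1 ∨ colm = nC - 1 then
          loopB nR nC m [(row, colm)]
        else m) m) init := by
  have hbodyPres : ∀ (m : List (List Int)) (row colm : Int),
      onesM (if row = 0 ∨ colm = 0 ∨ row = nR - 1 ∨ colm = nR - 1 ∨
           row = nC - 1 ∨ colm = nC - 1 then
          if mget m row colm = 1 then
            verAF nR nC (2 * onesM init + 1) m row colm
          else m
        else m) ≤ onesM m := by
    intro m row colm
    split
    · split
      · exact onesM_verAF_le _ _ _ _ _ _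
      · exact le_refl _
    · exact le_refl _
  refine foldl_eq_inv (fun m => onesM m ≤ onesM init) _ _ _ init ?_ ?_ (le_refl _)
  · intro m row hrow hP
    have hrow' : (0 : Int) ≤ row ∧ row < nR := (PySem.List.mem_pyRange_one).mp hrow
    refine foldl_eq_inv (fun m => onesM m ≤ onesM init) _ _ _ m ?_ ?_ hP
    · intro m' colm hcolm hP'
      have hcolm' : (0 : Int) ≤ colm ∧ colm < nC := (PySem.List.mem_pyRange_one).mp hcolm
      by_cases hb : row = 0 ∨ colm = 0 ∨ row = nR - 1 ∨ colm = nR - 1 ∨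
          row = nC - 1 ∨ colm = nC - 1
      · rw [if_pos hb, if_pos hb]
        have hsim := loopB_sim nR nC (onesM m') m' (le_refl _) [] row colm
          (2 * onesM init + 1 + 1) (by omega)
        rw [hsim, loopB]
        rw [filtroF,
          if_neg (show ¬(row ≥ nR ∨ row < 0 ∨ colm ≥ nC ∨ colm < 0) by omega)]
      · rw [if_neg hb, if_neg hb]
    · intro m' colm hP'
      calc onesM _ ≤ onesM m' := hbodyPres m' row colm
        _ ≤ onesM init := hP'
  · intro m row hP
    refine foldl_pres (fun m => onesM m ≤ onesM init) _ _ m ?_ hP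
    intro m' colm hP'
    calc onesM _ ≤ onesM m' := hbodyPres m' row colm
      _ ≤ onesM init := hP'

-- ===== VERDICT (by name: the statement is the Claim_ definition above) =====
theorem separarIslas_spec : Claim_equal_separarIslas := by
  intro matriz _ _
  simp only [Spec_separarIslas, separarIslas, separarIslas_alt]
  exact main_aux matriz (matriz.length : Int)
    (((PySem.List.pyGet? matriz 1).getD []).length : Int)
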